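-- pv_equiv track=rewrite | github.com/stephansturges/Tator | tools/augment_features_with_image_context.py | _find_img_embed_block
-- ===== SOURCE A (Python) =====
-- from typing import Any, Dict, List, Optional, Sequence, Tuple
--
-- def _find_img_embed_block(names: Sequence[str]) -> Tuple[int, int]:
--     start = -1
--     for idx, name in enumerate(names):
--         if name.startswith("img_clf_emb_rp::"):
--             start = idx
--             break
--     if start < 0:
--         return -1, -1
--     end = start
--     while end < len(names) and names[end].startswith("img_clf_emb_rp::"):
--         end += 1
--     return start, end
-- ===== SOURCE B (Python) =====
-- def _find_img_embed_block(names):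
--     matches = [i for i, n in enumerate(names) if n.startswith("img_clf_emb_rp::")]
--     if not matches:
--         return -1, -1
--     start = matches[0]
--     end = start
--     for m in matches:
--         if m == end:
--             end += 1
--         else:
--             break
--     return start, end
-- ===== Notes on version B (the rewrite author's own statement) =====
-- stated objective: alternative
-- what changed: B first collects all matching indices with one comprehension and then extends the exclusive end over that index list while it stays consecutive, instead of A's two separate scans (a find loop then a while loop indexing back into names).
import Mathlib
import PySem

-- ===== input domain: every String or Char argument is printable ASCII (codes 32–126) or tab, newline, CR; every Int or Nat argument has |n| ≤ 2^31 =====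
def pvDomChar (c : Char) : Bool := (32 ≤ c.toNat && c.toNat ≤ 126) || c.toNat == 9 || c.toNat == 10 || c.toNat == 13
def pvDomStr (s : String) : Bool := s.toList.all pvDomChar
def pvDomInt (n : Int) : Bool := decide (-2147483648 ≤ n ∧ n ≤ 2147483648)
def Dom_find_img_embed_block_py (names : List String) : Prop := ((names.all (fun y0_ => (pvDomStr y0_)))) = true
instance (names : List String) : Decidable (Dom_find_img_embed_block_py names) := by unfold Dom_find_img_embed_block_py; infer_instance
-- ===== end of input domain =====

-- B replaces A's two scans (a find loop, then a while loop re-indexing names) by one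
-- comprehension collecting every matching index and a loop extending the exclusive end
-- over that index list while it stays consecutive; same O(n) cost, different decomposition.

-- shared predicate: name.startswith("img_clf_emb_rp::")
def pvPred (n : String) : Bool := PySem.Str.startswith n "img_clf_emb_rp::"

-- ===== PORT A =====
-- for idx, name in enumerate(names): if name.startswith(...): start = idx; break
def pvAFind : List String → Int → Int
  | [], _ => -1
  | n :: t, idx => if pvPred n then idx else pvAFind t (idx + 1)

-- while end < len(names) and names[end].startswith(...): end += 1
def pvAExtend (names : List String) (e : Nat) : Nat :=
  if h : e < names.length then
    if pvPred names[e] then pvAExtend names (e + 1) else e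
  else e
termination_by names.length - e

def find_img_embed_block_py (names : List String) : Int × Int :=
  let start := pvAFind names 0
  if start < 0 then (-1, -1)
  else (start, (pvAExtend names start.toNat : Int))

-- ===== PORT B =====
-- matches = [i for i, n in enumerate(names) if n.startswith(...)]
def pvBMatches : List String → Int → List Int
  | [], _ => []
  | n :: t, k => if pvPred n then k :: pvBMatches t (k + 1) else pvBMatches t (k + 1)

-- for m in matches: if m == end: end += 1 else: break
def pvBLoop : List Int → Int → Int
  | [], e => e
  | m :: rest, e => if m == e then pvBLoop rest (e + 1) else e

def find_img_embed_block_py_alt (names : List String) : Int × Int :=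
  match pvBMatches names 0 with
  | [] => (-1, -1)
  | m0 :: rest => (m0, pvBLoop (m0 :: rest) m0)

-- ===== PRECONDITION & SPEC =====
def Spec_find_img_embed_block_py (names : List String) (out : Int × Int) : Prop := out = find_img_embed_block_py_alt names
instance (names : List String) (out : Int × Int) : Decidable (Spec_find_img_embed_block_py names out) := by unfold Spec_find_img_embed_block_py; infer_instance

-- ===== CLAIM (what is proved, stated in full; the proofs are below) =====
def Claim_equal_find_img_embed_block_py : Prop := ∀ (names : List String), Dom_find_img_embed_block_py names → Spec_find_img_embed_block_py names (find_img_embed_block_py names)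

-- ===== LEMMAS AND PROOFS =====

-- A's while loop from index e returns e plus the length of the run of matches at e.
theorem pvAExtend_eq (names : List String) : ∀ e, pvAExtend names e = e + ((names.drop e).takeWhile pvPred).length := by
  have key : ∀ f e, names.length - e ≤ f → pvAExtend names e = e + ((names.drop e).takeWhile pvPred).length := by
    intro f
    induction f with
    | zero =>
      intro e he
      have hle : names.length ≤ e := by omega
      rw [pvAExtend]
      simp [Nat.not_lt.mpr hle, List.drop_eq_nil_of_le hle]
    | succ f ih =>
      intro e he
      rw [pvAExtend]
      by_cases h : e < names.length
      · have hd : names.drop e = names[e] :: names.drop (e + 1) := List.drop_eq_getElem_cons h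
        by_cases hp : pvPred names[e]
        · rw [dif_pos h, if_pos hp, ih (e + 1) (by omega), hd, List.takeWhile_cons, if_pos hp]
          simp
          omega
        · rw [dif_pos h, if_neg hp, hd, List.takeWhile_cons, if_neg hp]
          simp
      · have hle : names.length ≤ e := by omega
        simp [h, List.drop_eq_nil_of_le hle]
  intro e
  exact key (names.length - e) e le_rfl

-- B's matched-index loop run when started strictly below every index: breaks at once.
theorem pvBLoop_lt : ∀ (t : List String) (j e : Int), e < j → pvBLoop (pvBMatches t j) e = e := by
  intro t
  induction t with
  | nil => intro j e _; rfl
  | cons n t ih =>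
    intro j e hlt
    by_cases hp : pvPred n
    · have : (j == e) = false := by simp; omega
      simp [pvBMatches, hp, pvBLoop, this]
    · rw [show pvBMatches (n :: t) j = pvBMatches t (j + 1) by simp [pvBMatches, hp]]
      exact ih (j + 1) e (by omega)

-- B's loop over the matched indices of t starting at offset k advances by the run length.
theorem pvBLoop_run : ∀ (t : List String) (k : Int), pvBLoop (pvBMatches t k) k = k + ((t.takeWhile pvPred).length : Int) := by
  intro t
  induction t with
  | nil => intro k; simp [pvBMatches, pvBLoop]
  | cons n t ih =>
    intro k
    by_cases hp : pvPred n
    · simp only [pvBMatches, hp, if_true, pvBLoop, BEq.rfl, if_true]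
      rw [ih (k + 1)]
      simp [List.takeWhile_cons, hp]
      omega
    · rw [show pvBMatches (n :: t) k = pvBMatches t (k + 1) by simp [pvBMatches, hp]]
      rw [pvBLoop_lt t (k + 1) k (by omega)]
      simp [List.takeWhile_cons, hp]

-- A's find loop in terms of findIdx?.
theorem pvAFind_char : ∀ (names : List String) (k : Int),
    pvAFind names k = (match names.findIdx? pvPred with | none => -1 | some i => k + i) := by
  intro names
  induction names with
  | nil => intro k; rfl
  | cons n t ih =>
    intro k
    by_cases hp : pvPred n
    · simp [pvAFind, hp, List.findIdx?_cons]
    · rw [pvAFind]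
      simp only [hp, if_false]
      rw [ih (k + 1)]
      simp only [List.findIdx?_cons, hp, if_false]
      cases h : t.findIdx? pvPred with
      | none => simp [h]
      | some i => simp [h]; push_cast; ring

-- B's comprehension in terms of findIdx?.
theorem pvBMatches_char : ∀ (names : List String) (k : Int),
    pvBMatches names k = (match names.findIdx? pvPred with
      | none => []
      | some i => (k + i) :: pvBMatches (names.drop (i + 1)) (k + i + 1)) := by
  intro names
  induction names with
  | nil => intro k; rfl
  | cons n t ih =>
    intro k
    by_cases hp : pvPred n
    · simp [pvBMatches, hp, List.findIdx?_cons]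
    · rw [show pvBMatches (n :: t) k = pvBMatches t (k + 1) by simp [pvBMatches, hp]]
      rw [ih (k + 1), List.findIdx?_cons, if_neg hp]
      cases h : t.findIdx? pvPred with
      | none => simp
      | some i =>
        simp only [Option.map_some]
        have h1 : (k + 1 + (i : Int)) = k + ((i + 1 : Nat) : Int) := by push_cast; ring
        rw [h1]
        simp [List.drop_succ_cons]

-- findIdx? gives an in-range index where the predicate holds.
theorem pvFindIdx?_some : ∀ (names : List String) (i : Nat), names.findIdx? pvPred = some i →
    i < names.length ∧ pvPred names[i]! = true := by
  intro names
  induction names with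
  | nil => intro i h; simp [List.findIdx?, List.findIdx?.go] at h
  | cons n t ih =>
    intro i h
    by_cases hp : pvPred n
    · rw [List.findIdx?_cons, if_pos hp] at h
      obtain rfl : i = 0 := by simpa using h.symm
      simpa using hp
    · rw [List.findIdx?_cons, if_neg hp] at h
      cases hj : t.findIdx? pvPred with
      | none => rw [hj] at h; simp at h
      | some j =>
        rw [hj] at h
        obtain rfl : i = j + 1 := by simpa using h.symm
        obtain ⟨hlt, hpj⟩ := ih j hj
        exact ⟨by simpa using Nat.succ_lt_succ hlt, by simpa [List.getElem!_eq_getElem?_getD] using hpj⟩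

-- ===== VERDICT (by name: the statement is the Claim_ definition above) =====
theorem find_img_embed_block_py_spec : Claim_equal_find_img_embed_block_py := by
  unfold Claim_equal_find_img_embed_block_py Spec_find_img_embed_block_py
  intro names _
  unfold find_img_embed_block_py find_img_embed_block_py_alt
  cases h : names.findIdx? pvPred with
  | none =>
    rw [pvAFind_char names 0, pvBMatches_char names 0]
    simp [h]
  | some i =>
    obtain ⟨hlt, hp⟩ := pvFindIdx?_some names i h
    have hp' : pvPred names[i] = true := by
      simpa [List.getElem!_eq_getElem?_getD, List.getElem?_eq_getElem hlt] using hp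
    rw [pvAFind_char names 0, pvBMatches_char names 0]
    simp only [h, zero_add]
    have hnn : ¬ ((i : Int) < 0) := by omega
    have hd : names.drop i = names[i] :: names.drop (i + 1) := List.drop_eq_getElem_cons hlt
    have htn : ((i : Int)).toNat = i := Int.toNat_natCast i
    simp only [hnn, if_false, htn]
    rw [pvAExtend_eq names i, hd]
    simp only [List.takeWhile_cons, hp', if_true, pvBLoop, BEq.rfl, if_true]
    rw [pvBLoop_run (names.drop (i + 1)) ((i : Int) + 1)]
    simp only [Prod.mk.injEq, true_and, List.length_cons]
    push_cast
    ring
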